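-- pv_equiv track=rewrite | github.com/Gamermertcan/DKSL | Python/dksl1.py | get
-- ===== SOURCE A (Python) =====
-- example_dksl = '''__dksl__
-- _main_
-- _data_
-- Example
-- _-data_
-- _data2_
-- Example2
-- _data3_
-- Example3
-- _-data3_
-- _-data2_
-- _-main_'''
--
-- def get(dksl=example_dksl, take='main'):
--     if dksl.startswith('__dksl__'):
--         start_idx = dksl.find('_' + take + '_') + len(take) + 1
--         end_idx = dksl.find('_-' + take + '_')
--
--         main_block = dksl[start_idx:end_idx].strip()
--         sub_blocks = []
--         current_block = ''
--         in_block = False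
--
--         for char in main_block:
--             if char == '_' and not in_block:
--                 in_block = True
--             elif char == '_' and in_block:
--                 in_block = False
--                 if current_block:
--                     sub_blocks.append(current_block.strip())
--                     current_block = ''
--             elif in_block:
--                 current_block += char
--
--         if current_block:
--             sub_blocks.append(current_block.strip())
--
--         return [block for block in sub_blocks if block]
--
--     return None
-- ===== SOURCE B (Python) =====
-- example_dksl = '''__dksl__
-- _main_
-- _data_
-- Example
-- _-data_
-- _data2_
-- Example2
-- _data3_
-- Example3
-- _-data3_
-- _-data2_
-- _-main_'''
--
-- def get(dksl=example_dksl, take='main'):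
--     if not dksl.startswith('__dksl__'):
--         return None
--     start_idx = dksl.find('_' + take + '_') + len(take) + 1
--     end_idx = dksl.find('_-' + take + '_')
--     main_block = dksl[start_idx:end_idx].strip()
--     parts = main_block.split('_')
--     blocks = [p.strip() for p in parts[1::2]]
--     return [b for b in blocks if b]
-- ===== Notes on version B (the rewrite author's own statement) =====
-- stated objective: idiomatic
-- what changed: The character-by-character in_block state machine is replaced by split('_') on main_block followed by selecting the odd-indexed segments (parts[1::2]), stripping each and dropping the empty ones.
import Mathlib
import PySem

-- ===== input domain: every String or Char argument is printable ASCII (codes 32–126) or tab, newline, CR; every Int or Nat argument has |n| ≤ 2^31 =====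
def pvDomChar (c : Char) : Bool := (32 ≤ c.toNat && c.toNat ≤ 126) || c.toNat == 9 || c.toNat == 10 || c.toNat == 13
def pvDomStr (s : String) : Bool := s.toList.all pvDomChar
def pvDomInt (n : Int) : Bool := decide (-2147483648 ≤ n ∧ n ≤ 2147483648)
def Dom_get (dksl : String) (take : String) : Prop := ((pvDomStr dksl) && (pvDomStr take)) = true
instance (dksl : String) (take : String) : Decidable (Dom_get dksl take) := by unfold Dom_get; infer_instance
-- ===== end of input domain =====

-- B replaces A's character-by-character in_block state machine by split('_') plus selection of
-- the odd-indexed segments (parts[1::2]); objective: idiomatic, same return value everywhere.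

-- ===== PORT A =====
-- the for-loop over main_block: state (sub_blocks, current_block, in_block)
def pvLoopA : List Char → List (List Char) → List Char → Bool → List (List Char) × List Char × Bool
  | [], acc, cur, inb => (acc, cur, inb)
  | c :: cs, acc, cur, inb =>
    if c = '_' ∧ inb = false then pvLoopA cs acc cur true
    else if c = '_' ∧ inb = true then
      (if cur ≠ [] then pvLoopA cs (acc ++ [PySem.Chars.strip cur]) [] false
       else pvLoopA cs acc cur false)
    else if inb = true then pvLoopA cs acc (cur ++ [c]) inb
    else pvLoopA cs acc cur inb

def get (dksl : String) (take : String) : Option (List String) :=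
  if PySem.Chars.startswith dksl.toList "__dksl__".toList then
    let start_idx : Int :=
      PySem.Chars.find dksl.toList ('_' :: take.toList ++ ['_']) + (take.toList.length : Int) + 1
    let end_idx : Int := PySem.Chars.find dksl.toList ('_' :: '-' :: take.toList ++ ['_'])
    let main_block := PySem.Chars.strip (PySem.List.slice dksl.toList (some start_idx) (some end_idx))
    let st := pvLoopA main_block [] [] false
    let sub_blocks := if st.2.1 ≠ [] then st.1 ++ [PySem.Chars.strip st.2.1] else st.1
    some ((sub_blocks.filter (fun b => b ≠ [])).map (fun b => String.ofList b))
  else none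

-- ===== PORT B =====
def get_alt (dksl : String) (take : String) : Option (List String) :=
  if PySem.Chars.startswith dksl.toList "__dksl__".toList then
    let start_idx : Int :=
      PySem.Chars.find dksl.toList ('_' :: take.toList ++ ['_']) + (take.toList.length : Int) + 1
    let end_idx : Int := PySem.Chars.find dksl.toList ('_' :: '-' :: take.toList ++ ['_'])
    let main_block := PySem.Chars.strip (PySem.List.slice dksl.toList (some start_idx) (some end_idx))
    let parts := PySem.Chars.splitOn main_block ['_']
    let blocks := ((PySem.List.slice? parts (some 1) none 2).getD []).map PySem.Chars.strip
    some ((blocks.filter (fun b => b ≠ [])).map (fun b => String.ofList b))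
  else none

-- ===== PRECONDITION & SPEC =====
def Spec_get (dksl : String) (take : String) (out : Option (List String)) : Prop := out = get_alt dksl take
instance (dksl : String) (take : String) (out : Option (List String)) : Decidable (Spec_get dksl take out) := by unfold Spec_get; infer_instance

-- ===== CLAIM (what is proved, stated in full; the proofs are below) =====
def Claim_equal_get : Prop := ∀ (dksl : String) (take : String), Dom_get dksl take → Spec_get dksl take (get dksl take)

-- ===== LEMMAS AND PROOFS =====

-- structural split on '_': (first part, remaining parts)
def pvSplit : List Char → List Char × List (List Char)
  | [] => ([], [])
  | c :: cs => if c = '_' then ([], (pvSplit cs).1 :: (pvSplit cs).2)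
               else (c :: (pvSplit cs).1, (pvSplit cs).2)

-- elements at even / odd 0-based positions
def pvEvens {α : Type} : List α → List α
  | [] => []
  | [a] => [a]
  | a :: _ :: t => a :: pvEvens t

def pvOdds {α : Type} : List α → List α
  | [] => []
  | _ :: t => pvEvens t

def pvFinish (st : List (List Char) × List Char × Bool) : List (List Char) :=
  if st.2.1 ≠ [] then st.1 ++ [PySem.Chars.strip st.2.1] else st.1

def pvG (l : List (List Char)) : List (List Char) :=
  (l.map PySem.Chars.strip).filter (fun b => b ≠ [])

theorem pvEvens_cons {α : Type} (a : α) (t : List α) : pvEvens (a :: t) = a :: pvOdds t := by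
  cases t <;> simp [pvEvens, pvOdds]

theorem pvLoopA_acc (cs : List Char) : ∀ acc cur inb,
    pvLoopA cs acc cur inb =
      ((acc ++ (pvLoopA cs [] cur inb).1, (pvLoopA cs [] cur inb).2)) := by
  induction cs with
  | nil => intro acc cur inb; simp [pvLoopA]
  | cons c cs ih =>
    intro acc cur inb
    simp only [pvLoopA]
    split_ifs with h1 h2 h3 h4
    · rw [ih acc, ih ([] : List (List Char))]
    · simp only [List.nil_append]
      rw [ih (acc ++ [PySem.Chars.strip cur]), ih ([PySem.Chars.strip cur])]
      simp
    · rw [ih acc, ih ([] : List (List Char))]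
    · rw [ih acc, ih ([] : List (List Char))]
    · rw [ih acc, ih ([] : List (List Char))]

theorem pvFinish_prepend (a : List (List Char)) (st : List (List Char) × List Char × Bool) :
    pvFinish (a ++ st.1, st.2) = a ++ pvFinish st := by
  unfold pvFinish; split_ifs <;> simp

theorem splitOn_go_eq : ∀ (fuel : Nat) (l cur : List Char) (acc : List (List Char)),
    l.length < fuel →
    PySem.Chars.splitOn.go ['_'] fuel l cur acc =
      acc.reverse ++ (cur.reverse ++ (pvSplit l).1) :: (pvSplit l).2 := by
  intro fuel
  induction fuel with
  | zero => intro l cur acc h; omega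
  | succ n ih =>
    intro l cur acc h
    cases l with
    | nil => simp [PySem.Chars.splitOn.go, pvSplit]
    | cons c rest =>
      by_cases hc : c = '_'
      · subst hc
        have hpre : List.isPrefixOf ['_'] ('_' :: rest) = true := by
          simp [List.isPrefixOf]
        simp only [PySem.Chars.splitOn.go, hpre, if_pos]
        simp only [show List.drop ['_'].length ('_' :: rest) = rest from rfl]
        rw [ih rest [] ((cur.reverse) :: acc) (by simpa using Nat.lt_of_succ_lt_succ h)]
        simp [pvSplit]
      · have hpre : List.isPrefixOf ['_'] (c :: rest) = false := by
          simp [List.isPrefixOf]; exact fun hh => hc hh.symm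
        simp only [PySem.Chars.splitOn.go, hpre]
        rw [ih rest (c :: cur) acc (by simpa using Nat.lt_of_succ_lt_succ h)]
        simp [pvSplit, hc]

theorem splitOn_eq (cs : List Char) :
    PySem.Chars.splitOn cs ['_'] = (pvSplit cs).1 :: (pvSplit cs).2 := by
  unfold PySem.Chars.splitOn
  rw [splitOn_go_eq (cs.length + 1) cs [] [] (by omega)]
  simp

theorem filterMap_odds {α : Type} (l : List α) :
    List.filterMap (fun (k : Nat) => l[((1 : Int) + 2 * (k : Int)).toNat]?) (List.range (l.length / 2)) =
      pvOdds l := by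
  generalize hm : l.length / 2 = m
  induction m generalizing l with
  | zero =>
    match l, hm with
    | [], _ => simp [pvOdds]
    | [a], _ => simp [pvOdds, pvEvens]
    | a :: b :: t, hm => simp only [List.length_cons] at hm; omega
  | succ m ih =>
    match l, hm with
    | a :: b :: t, hm =>
      have ht : t.length / 2 = m := by
        simp [List.length] at hm; omega
      have h0 : ((a :: b :: t)[(1 + 2 * ((0:Nat) : Int)).toNat]?) = some b := by norm_num
      rw [List.range_succ_eq_map, List.filterMap_cons, h0, List.filterMap_map]
      rw [show pvOdds (a :: b :: t) = b :: pvOdds t by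
        rw [show pvOdds (a :: b :: t) = pvEvens (b :: t) from rfl, pvEvens_cons]]
      refine congrArg (List.cons b) ?_
      rw [← ih t ht]
      refine List.filterMap_congr ?_
      intro k _
      simp only [Function.comp]
      have h1 : ((1 : Int) + 2 * ((Nat.succ k : Nat) : Int)).toNat = 2 * k + 3 := by
        omega
      have h2 : ((1 : Int) + 2 * ((k : Nat) : Int)).toNat = 2 * k + 1 := by
        omega
      rw [h1, h2]
      rfl
    | [], hm => simp only [List.length_nil] at hm; omega
    | [a], hm => simp only [List.length_singleton] at hm; omega

theorem slice?_odds {α : Type} (l : List α) :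
    PySem.List.slice? l (some 1) none 2 = some (pvOdds l) := by
  unfold PySem.List.slice? PySem.List.sliceIndices
  norm_num
  cases l with
  | nil => simp [pvOdds]
  | cons a t =>
    have hmin : min (1:Int) (((a::t).length : Int)) = 1 := by
      simp only [List.length_cons]; omega
    rw [hmin]
    by_cases ht : 1 < (a::t).length
    · rw [if_pos ht]
      have hc : ((((a::t).length : Int)) - 1 + 2 - 1) / 2 = (((a::t).length / 2 : Nat) : Int) := by
        omega
      rw [hc, Int.toNat_natCast]
      exact filterMap_odds _
    · rw [if_neg ht]
      have h0 : t = [] := by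
        cases t with
        | nil => rfl
        | cons b t' => exfalso; apply ht; simp
      subst h0
      simp [pvOdds, pvEvens]

theorem pvLoopA_step1 (cs : List Char) : pvLoopA ('_' :: cs) [] [] false = pvLoopA cs [] [] true := by
  simp [pvLoopA]

theorem pvLoopA_step2 (cs cur : List Char) (h : cur ≠ []) :
    pvLoopA ('_' :: cs) [] cur true = pvLoopA cs [PySem.Chars.strip cur] [] false := by
  simp [pvLoopA, h]

theorem pvLoopA_step3 (cs : List Char) : pvLoopA ('_' :: cs) [] [] true = pvLoopA cs [] [] false := by
  simp [pvLoopA]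

theorem pvLoopA_step4 (c : Char) (cs : List Char) (hc : ¬ c = '_') (cur : List Char) :
    pvLoopA (c :: cs) [] cur true = pvLoopA cs [] (cur ++ [c]) true := by
  simp [pvLoopA, hc]

theorem pvLoopA_step5 (c : Char) (cs : List Char) (hc : ¬ c = '_') :
    pvLoopA (c :: cs) [] [] false = pvLoopA cs [] [] false := by
  simp [pvLoopA, hc]

theorem pvOdds_cons {α : Type} (a : α) (t : List α) : pvOdds (a :: t) = pvEvens t := rfl

theorem pvStrip_nil : PySem.Chars.strip [] = [] := rfl

theorem pvMainFT (cs : List Char) :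
    ((pvFinish (pvLoopA cs [] [] false)).filter (fun b => b ≠ []) = pvG (pvEvens (pvSplit cs).2)) ∧
    (∀ cur, (pvFinish (pvLoopA cs [] cur true)).filter (fun b => b ≠ []) =
      pvG ((cur ++ (pvSplit cs).1) :: pvOdds (pvSplit cs).2)) := by
  induction cs with
  | nil =>
    constructor
    · simp [pvLoopA, pvFinish, pvSplit, pvEvens, pvG]
    · intro cur
      by_cases hc : cur = []
      · subst hc
        simp [pvLoopA, pvFinish, pvSplit, pvOdds, pvG, pvStrip_nil]
      · simp [pvLoopA, pvFinish, pvSplit, pvOdds, pvG, hc, List.filter_cons]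
  | cons c cs ih =>
    by_cases hc : c = '_'
    · subst hc
      constructor
      · rw [pvLoopA_step1, ih.2 []]
        simp only [pvSplit, reduceIte, List.nil_append]
        rw [pvEvens_cons]
      · intro cur
        by_cases hcur : cur = []
        · subst hcur
          rw [pvLoopA_step3, ih.1]
          simp only [pvSplit, reduceIte, List.nil_append]
          rw [pvOdds_cons]
          simp [pvG, pvStrip_nil]
        · rw [pvLoopA_step2 cs cur hcur, pvLoopA_acc,
            pvFinish_prepend [PySem.Chars.strip cur] (pvLoopA cs [] [] false),
            List.filter_append, ih.1]
          simp only [pvSplit, reduceIte]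
          rw [pvOdds_cons]
          simp [pvG, List.filter_cons]
          split_ifs <;> simp
    · constructor
      · rw [pvLoopA_step5 c cs hc, ih.1]
        simp only [pvSplit, if_neg hc]
      · intro cur
        rw [pvLoopA_step4 c cs hc cur, ih.2 (cur ++ [c])]
        simp only [pvSplit, if_neg hc]
        rw [List.append_assoc]
        rfl

theorem pvCore (cs : List Char) :
    (pvFinish (pvLoopA cs [] [] false)).filter (fun b => b ≠ []) =
      (((PySem.List.slice? (PySem.Chars.splitOn cs ['_']) (some 1) none 2).getD []).map
        PySem.Chars.strip).filter (fun b => b ≠ []) := by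
  rw [splitOn_eq, slice?_odds, Option.getD_some, (pvMainFT cs).1]
  rfl

-- ===== VERDICT (by name: the statement is the Claim_ definition above) =====
theorem get_spec : Claim_equal_get := by
  intro dksl take _
  unfold Spec_get _root_.get get_alt
  split_ifs with h
  · refine congrArg some ?_
    refine congrArg (List.map _) ?_
    exact pvCore _
  · rfl
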